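-- pv_equiv track=rewrite | github.com/diksha12p/DSA_Practice_Problems | Single Number II.py | count_set_bits
-- ===== SOURCE A (Python) =====
-- from typing import List
--
-- def count_set_bits(nums: List[int]) -> int:
--     result = 0
--
--     # Iterate through every bit
--     for i in range(0, 32):
--         # Find sum of set bits at ith position in all array elements
--         count, shift = 0, 1 << i
--         for j in range(0, len(nums)):
--             if nums[j] & shift:
--                 count = count + 1
--
--         # The bits with sum not multiple of 3, are the bits of element with single occurrence.
--         if count % 3:
--             result = result | shift
--
--     return result
-- ===== SOURCE B (Python) =====
-- from typing import List
--
-- def count_set_bits(nums: List[int]) -> int: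
--     # Single pass: 'ones'/'twos' hold the bits whose running count is 1 resp. 2 (mod 3).
--     ones, twos = 0, 0
--     for n in nums:
--         ones = (ones ^ n) & ~twos
--         twos = (twos ^ n) & ~ones
--     return (ones | twos) & 0xFFFFFFFF
-- ===== Notes on version B (the rewrite author's own statement) =====
-- stated objective: faster
-- what changed: Replaces the 32 per-bit counting passes over the array by a single pass carrying the classic ones/twos bitmask state machine (count mod 3 per bit), finished by masking (ones|twos) to 32 bits.
import Mathlib
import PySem

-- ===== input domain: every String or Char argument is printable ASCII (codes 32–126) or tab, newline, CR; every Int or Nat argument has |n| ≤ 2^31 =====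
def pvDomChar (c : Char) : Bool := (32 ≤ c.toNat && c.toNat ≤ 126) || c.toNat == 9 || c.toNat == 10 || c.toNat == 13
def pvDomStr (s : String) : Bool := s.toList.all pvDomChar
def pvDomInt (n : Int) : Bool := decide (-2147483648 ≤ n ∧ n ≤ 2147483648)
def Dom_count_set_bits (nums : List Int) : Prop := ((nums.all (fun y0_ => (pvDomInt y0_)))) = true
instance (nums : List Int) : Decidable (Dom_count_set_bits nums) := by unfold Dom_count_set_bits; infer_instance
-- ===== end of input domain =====

-- B replaces A's 32 per-bit counting passes by one pass with the ones/twos bitmask state machine; objective: faster (constant factor).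

-- ===== PORT A =====
-- for i in range(32): count bits at position i over all elements; or 2^i into result if count % 3 != 0
def count_set_bits (nums : List Int) : Int :=
  (PySem.List.pyRange 0 32 1).foldl (fun result i =>
    let shift : Int := (1 : Int) <<< i
    let count : Int :=
      (PySem.List.pyRange 0 (PySem.List.len nums) 1).foldl
        (fun count j => if Int.land (PySem.List.pyGetD nums j 0) shift ≠ 0 then count + 1 else count) 0
    if PySem.Int.mod count 3 ≠ 0 then Int.lor result shift else result) 0

-- ===== PORT B =====
-- loop body of Source B: ones = (ones ^ n) & ~twos; twos = (twos ^ n) & ~ones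
def pvStep (s : Int × Int) (n : Int) : Int × Int :=
  let ones := Int.land (Int.xor s.1 n) (Int.lnot s.2)
  (ones, Int.land (Int.xor s.2 n) (Int.lnot ones))

def count_set_bits_alt (nums : List Int) : Int :=
  let st := nums.foldl pvStep (0, 0)
  Int.land (Int.lor st.1 st.2) 4294967295

-- ===== PRECONDITION & SPEC =====
def Spec_count_set_bits (nums : List Int) (out : Int) : Prop := out = count_set_bits_alt nums
instance (nums : List Int) (out : Int) : Decidable (Spec_count_set_bits nums out) := by unfold Spec_count_set_bits; infer_instance

-- ===== CLAIM (what is proved, stated in full; the proofs are below) =====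
def Claim_equal_count_set_bits : Prop := ∀ (nums : List Int), Dom_count_set_bits nums → Spec_count_set_bits nums (count_set_bits nums)

-- ===== LEMMAS AND PROOFS =====

-- number of elements of nums with bit k set
def pvCnt (nums : List Int) (k : Nat) : Nat := nums.countP (fun n => n.testBit k)

-- the per-bit automaton realised by pvStep
def pvBump (p : Bool × Bool) (b : Bool) : Bool × Bool :=
  let o := (xor p.1 b) && !p.2
  (o, (xor p.2 b) && !o)

theorem pv_step_bit (s : Int × Int) (n : Int) (k : Nat) :
    ((pvStep s n).1.testBit k, (pvStep s n).2.testBit k)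
      = pvBump (s.1.testBit k, s.2.testBit k) (n.testBit k) := by
  simp [pvStep, pvBump, Int.testBit_land, Int.testBit_lxor, Int.testBit_lnot]

theorem pv_fold_bit (l : List Int) (k : Nat) : ∀ s : Int × Int,
    ((l.foldl pvStep s).1.testBit k, (l.foldl pvStep s).2.testBit k)
      = l.foldl (fun p n => pvBump p (n.testBit k)) (s.1.testBit k, s.2.testBit k) := by
  induction l with
  | nil => intro s; simp
  | cons n l ih =>
    intro s
    simp only [List.foldl_cons]
    rw [ih (pvStep s n), pv_step_bit]

theorem pv_bump_mod3 (c : Nat) (b : Bool) :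
    pvBump (decide (c % 3 = 1), decide (c % 3 = 2)) b
      = (decide ((c + b.toNat) % 3 = 1), decide ((c + b.toNat) % 3 = 2)) := by
  have h : c % 3 = 0 ∨ c % 3 = 1 ∨ c % 3 = 2 := by omega
  cases b <;> rcases h with h | h | h <;>
    simp [pvBump, h, Nat.add_mod]

theorem pv_bool_fold (l : List Int) (k : Nat) : ∀ c : Nat,
    l.foldl (fun p n => pvBump p (n.testBit k)) (decide (c % 3 = 1), decide (c % 3 = 2))
      = (decide ((c + pvCnt l k) % 3 = 1), decide ((c + pvCnt l k) % 3 = 2)) := by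
  induction l with
  | nil => intro c; simp [pvCnt]
  | cons n l ih =>
    intro c
    simp only [List.foldl_cons]
    rw [pv_bump_mod3, ih (c + (n.testBit k).toNat)]
    have hc : c + (n.testBit k).toNat + pvCnt l k = c + pvCnt (n :: l) k := by
      simp only [pvCnt, List.countP_cons]
      cases n.testBit k <;> simp <;> omega
    rw [hc]

theorem pv_alt_bits (nums : List Int) (k : Nat) :
    (nums.foldl pvStep (0, 0)).1.testBit k = decide (pvCnt nums k % 3 = 1)
      ∧ (nums.foldl pvStep (0, 0)).2.testBit k = decide (pvCnt nums k % 3 = 2) := by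
  have h := pv_fold_bit nums k (0, 0)
  have h0 : (Int.testBit 0 k, Int.testBit 0 k)
      = (decide ((0 : Nat) % 3 = 1), decide ((0 : Nat) % 3 = 2)) := by
    simp [Int.testBit]
  rw [h0] at h
  rw [pv_bool_fold nums k 0] at h
  simp only [Nat.zero_add] at h
  exact ⟨congrArg Prod.fst h, congrArg Prod.snd h⟩

theorem pv_int_eq_of_testBit {a b : Int} (ha : 0 ≤ a) (hb : 0 ≤ b)
    (h : ∀ k, a.testBit k = b.testBit k) : a = b := by
  lift a to ℕ using ha
  lift b to ℕ using hb
  exact congrArg _ (Nat.eq_of_testBit_eq fun i => h i)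

theorem pv_land_natCast_nonneg (x : Int) (m : Nat) : 0 ≤ Int.land x (m : Int) := by
  cases x with
  | ofNat a => exact Int.natCast_nonneg _
  | negSucc a => exact Int.natCast_nonneg _

theorem pv_ldiff_two_pow (m : Nat) (i : Nat) :
    Nat.ldiff (2 ^ i) m = if m.testBit i then 0 else 2 ^ i := by
  cases h : m.testBit i
  · simp only [Bool.false_eq_true, if_false]
    refine Nat.eq_of_testBit_eq fun j => ?_
    rcases eq_or_ne i j with rfl | hij
    · simp [Nat.testBit_ldiff, h]
    · simp [Nat.testBit_ldiff, hij]
  · simp only [if_true]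
    refine Nat.eq_of_testBit_eq fun j => ?_
    rcases eq_or_ne i j with rfl | hij
    · simp [Nat.testBit_ldiff, h]
    · simp [Nat.testBit_ldiff, hij]

theorem pv_land_two_pow_ne (n : Int) (i : Nat) :
    (Int.land n ((2 ^ i : Nat) : Int) ≠ 0) ↔ n.testBit i = true := by
  cases n with
  | ofNat m =>
    show (Int.ofNat (m &&& 2 ^ i) ≠ 0) ↔ _
    rw [Nat.and_two_pow]
    cases h : m.testBit i <;> simp [Int.testBit, h, Nat.pos_iff_ne_zero.symm]
  | negSucc m =>
    show (Int.ofNat (Nat.ldiff (2 ^ i) m) ≠ 0) ↔ _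
    rw [pv_ldiff_two_pow]
    cases h : m.testBit i <;> simp [Int.testBit, h, Nat.pos_iff_ne_zero.symm]

theorem pv_countA (nums : List Int) (i : Nat) :
    (PySem.List.pyRange 0 (PySem.List.len nums) 1).foldl
        (fun count j =>
          if Int.land (PySem.List.pyGetD nums j 0) ((1 : Int) <<< ((i : Nat) : Int)) ≠ 0
          then count + 1 else count) 0
      = (pvCnt nums i : Int) := by
  rw [Int.one_shiftLeft]
  rw [PySem.List.foldl_pyRange_zero_pyGetD nums 0
    (fun count n => if Int.land n ((2 ^ i : Nat) : Int) ≠ 0 then count + 1 else count) 0]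
  rw [PySem.List.foldl_ite_add_one (fun n => Int.land n ((2 ^ i : Nat) : Int) ≠ 0) nums 0]
  rw [List.countP_congr fun x _ => by
    simp only [decide_eq_true_eq]
    exact pv_land_two_pow_ne x i]
  simp [pvCnt]

theorem pv_mod3 (c : Nat) : (PySem.Int.mod (c : Int) 3 ≠ 0) ↔ c % 3 ≠ 0 := by
  rw [ne_eq, PySem.Int.mod_eq_zero_iff_dvd]
  omega

theorem pv_A_fold (nums : List Int) : ∀ m : Nat, ∃ N : Nat,
    (PySem.List.pyRange 0 (m : Int) 1).foldl (fun result i =>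
      let shift : Int := (1 : Int) <<< i
      let count : Int :=
        (PySem.List.pyRange 0 (PySem.List.len nums) 1).foldl
          (fun count j => if Int.land (PySem.List.pyGetD nums j 0) shift ≠ 0 then count + 1 else count) 0
      if PySem.Int.mod count 3 ≠ 0 then Int.lor result shift else result) 0 = (N : Int)
    ∧ ∀ k, N.testBit k = (decide (k < m) && decide (pvCnt nums k % 3 ≠ 0)) := by
  intro m
  induction m with
  | zero =>
    refine ⟨0, ?_, ?_⟩
    · rw [PySem.List.pyRange_one_eq_nil (a := 0) (b := ((0 : Nat) : Int)) (by omega)]; rfl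
    · intro k; simp [Nat.zero_testBit]
  | succ m ih =>
    obtain ⟨N, hN, hbit⟩ := ih
    have hsplit : ((m + 1 : Nat) : Int) = (m : Int) + 1 := by push_cast; ring
    rw [hsplit, PySem.List.pyRange_one_succ_right (by positivity), List.foldl_append,
      List.foldl_cons, List.foldl_nil, hN]
    simp only [pv_countA nums m]
    by_cases hmod : pvCnt nums m % 3 ≠ 0
    · rw [if_pos ((pv_mod3 (pvCnt nums m)).mpr hmod)]
      refine ⟨N ||| 2 ^ m, ?_, ?_⟩
      · rw [Int.one_shiftLeft]; rfl
      · intro k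
        rw [Nat.testBit_lor, hbit k, Nat.testBit_two_pow]
        rcases Nat.lt_trichotomy k m with hk | rfl | hk
        · have h1 : k ≤ m := by omega
          simp [Nat.ne_of_gt hk, hk, h1]
        · simp [hmod]
        · have h1 : ¬ k < m := by omega
          have h2 : ¬ k ≤ m := by omega
          simp [Nat.ne_of_lt hk, h1, h2]
    · rw [if_neg (fun hc => hmod ((pv_mod3 (pvCnt nums m)).mp hc))]
      refine ⟨N, rfl, ?_⟩
      intro k
      rw [hbit k]
      rcases Nat.lt_trichotomy k m with hk | rfl | hk
      · have h1 : k ≤ m := by omega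
        simp [hk, h1]
      · have h1 : ¬ k < k := by omega
        simp only [not_not] at hmod
        simp [hmod]
      · have h1 : ¬ k < m := by omega
        have h2 : ¬ k ≤ m := by omega
        simp [h1, h2]

theorem pv_main (nums : List Int) : count_set_bits nums = count_set_bits_alt nums := by
  obtain ⟨N, hN, hbit⟩ := pv_A_fold nums 32
  have hA : count_set_bits nums = (N : Int) := by
    have : ((32 : Nat) : Int) = (32 : Int) := by norm_num
    rw [count_set_bits, ← this, hN]
  rw [hA, count_set_bits_alt]
  have hmask : (4294967295 : Int) = ((2 ^ 32 - 1 : Nat) : Int) := by norm_num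
  rw [hmask]
  apply pv_int_eq_of_testBit (Int.natCast_nonneg N) (pv_land_natCast_nonneg _ _)
  intro k
  obtain ⟨h1, h2⟩ := pv_alt_bits nums k
  rw [Int.testBit_land, Int.testBit_lor, h1, h2]
  have hm : Int.testBit ((2 ^ 32 - 1 : Nat) : Int) k = decide (k < 32) := by
    show Nat.testBit (2 ^ 32 - 1) k = decide (k < 32)
    exact Nat.testBit_two_pow_sub_one 32 k
  rw [hm]
  have hcast : ((N : Int)).testBit k = N.testBit k := rfl
  rw [hcast, hbit k]
  have h3 : pvCnt nums k % 3 = 0 ∨ pvCnt nums k % 3 = 1 ∨ pvCnt nums k % 3 = 2 := by omega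
  rcases h3 with h | h | h <;> cases hk : decide (k < 32) <;> simp [h, hk]

-- ===== VERDICT (by name: the statement is the Claim_ definition above) =====
theorem count_set_bits_spec : Claim_equal_count_set_bits := by
  intro nums _
  show count_set_bits nums = count_set_bits_alt nums
  exact pv_main nums
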